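-- pv_equiv track=rewrite | github.com/sfimediafutures/WP4_transcribe | modules/mod_speaker_identification2.py | find_most_likely_speaker
-- ===== SOURCE A (Python) =====
-- import operator
--
-- def find_most_likely_speaker(cast, start, end):
--     """
--     Look through the cast list, find all the members that are active
--     within start-end and return the most likely cast member (if any).
--     """
--     active_members = {}
--     for person in cast:
--         active_members[person] = 0
--         for entry in cast[person]: # entry has "start", "end"
--             if entry["end"] > start and entry["start"] < end:
--                 # Add the overlapping part of this segment
--                 active_members[person] += min(entry["end"], end) - max(entry["start"], start)
--             if entry["end"] > end:
--                 break  # No more hits for this member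
--
--     l = [(i, active_members[i]) for i in active_members]
--     l.sort(key=operator.itemgetter(1), reverse=True)
--     if l[0][1] == 0:
--         return None
--     return l[0][0]
-- ===== SOURCE B (Python) =====
-- def find_most_likely_speaker(cast, start, end):
--     """
--     Single pass: keep a running best (person, total overlap) while walking the
--     cast; first person wins ties.  Returns None when the best overlap is 0
--     (and when the cast is empty, where the original raises IndexError).
--     """
--     best_person = None
--     best_total = None
--     for person, entries in cast.items():
--         total = 0
--         for entry in entries:
--             if entry["end"] > start and entry["start"] < end:
--                 total += min(entry["end"], end) - max(entry["start"], start)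
--             if entry["end"] > end:
--                 break
--         if best_total is None or total > best_total:
--             best_person, best_total = person, total
--     if best_total == 0:
--         return None
--     return best_person
-- ===== Notes on version B (the rewrite author's own statement) =====
-- stated objective: simpler
-- what changed: B drops A's active_members dict and the stable reverse sort of all (person, total) pairs, instead keeping a single running best (person, total) during the one pass over the cast, updating only on strictly greater totals so the first person still wins ties.
import Mathlib
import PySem

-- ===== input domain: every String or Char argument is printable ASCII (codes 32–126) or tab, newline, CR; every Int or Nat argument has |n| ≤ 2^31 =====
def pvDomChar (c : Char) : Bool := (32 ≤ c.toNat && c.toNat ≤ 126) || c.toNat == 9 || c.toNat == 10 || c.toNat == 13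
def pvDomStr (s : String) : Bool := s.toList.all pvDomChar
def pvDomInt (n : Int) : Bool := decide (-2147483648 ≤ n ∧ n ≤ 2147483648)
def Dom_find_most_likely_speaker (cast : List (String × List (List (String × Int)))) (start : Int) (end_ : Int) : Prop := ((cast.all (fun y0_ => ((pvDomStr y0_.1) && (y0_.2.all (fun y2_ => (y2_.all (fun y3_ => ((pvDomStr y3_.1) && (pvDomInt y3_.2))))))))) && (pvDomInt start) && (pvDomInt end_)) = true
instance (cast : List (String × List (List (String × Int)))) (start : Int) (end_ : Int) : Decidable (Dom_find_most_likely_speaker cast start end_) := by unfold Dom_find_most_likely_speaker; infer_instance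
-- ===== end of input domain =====

-- B replaces A's totals-dict + stable reverse sort by a single running first-wins maximum (objective: simpler).

-- ===== PORT A =====
-- entry["end"] / entry["start"]: dict lookup; Pre_ guarantees both keys are present
-- (.getD 0 is never the taken branch on admitted inputs — Python raises KeyError exactly
-- when the lookup is none, and Pre_ excludes those inputs).
def fmlsEntryEnd (entry : List (String × Int)) : Int :=
  ((PySem.Dict.mk entry).get? "end").getD 0
def fmlsEntryStart (entry : List (String × Int)) : Int :=
  ((PySem.Dict.mk entry).get? "start").getD 0

-- inner `for entry in cast[person]` loop of A, threading active_members (the `+=` is Dict.modify)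
def fmlsInnerA (start end_ : Int) (person : String) :
    List (List (String × Int)) → PySem.Dict String Int → PySem.Dict String Int
  | [], am => am
  | entry :: rest, am =>
      let am :=
        if fmlsEntryEnd entry > start ∧ fmlsEntryStart entry < end_ then
          am.modify person 0
            (· + (min (fmlsEntryEnd entry) end_ - max (fmlsEntryStart entry) start))
        else am
      if fmlsEntryEnd entry > end_ then am else fmlsInnerA start end_ person rest am

-- cast[person]: dict lookup = first match (Pre_ excludes duplicate keys, where the
-- assoc-list representation of a Python dict is ambiguous)
def fmlsLookup (cast : List (String × List (List (String × Int)))) (person : String) :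
    List (List (String × Int)) :=
  (((cast.find? (fun q => q.1 == person)).map (·.2)).getD [])

-- outer `for person in cast` loop of A
def fmlsOuterA (cast : List (String × List (List (String × Int)))) (start end_ : Int) :
    List (String × List (List (String × Int))) → PySem.Dict String Int → PySem.Dict String Int
  | [], am => am
  | (person, _) :: rest, am =>
      fmlsOuterA cast start end_ rest
        (fmlsInnerA start end_ person (fmlsLookup cast person) (am.insert person 0))

def find_most_likely_speaker (cast : List (String × List (List (String × Int)))) (start : Int) (end_ : Int) : Option String :=
  -- active_members = the dict after the loops; l = its items sorted by count, descending, stable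
  match PySem.List.sorted (fmlsOuterA cast start end_ cast PySem.Dict.empty).items (fun p => p.2) true with
  | [] => none            -- unreachable under Pre_ (cast ≠ []): Python raises IndexError at l[0]
  | (p, c) :: _ => if c = 0 then none else some p

-- ===== PORT B =====
-- inner loop of B (same accumulation and early break, into a local total)
def fmlsTotalB (start end_ : Int) : List (List (String × Int)) → Int → Int
  | [], total => total
  | entry :: rest, total =>
      let total :=
        if fmlsEntryEnd entry > start ∧ fmlsEntryStart entry < end_ then
          total + (min (fmlsEntryEnd entry) end_ - max (fmlsEntryStart entry) start)
        else total
      if fmlsEntryEnd entry > end_ then total else fmlsTotalB start end_ rest total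

-- running best (person, total); update only on strictly greater (first person wins ties)
def fmlsBestB (start end_ : Int) :
    List (String × List (List (String × Int))) → Option (String × Int) → Option (String × Int)
  | [], best => best
  | (person, entries) :: rest, best =>
      let total := fmlsTotalB start end_ entries 0
      let best :=
        match best with
        | none => some (person, total)
        | some (bp, bt) => if total > bt then some (person, total) else some (bp, bt)
      fmlsBestB start end_ rest best

def find_most_likely_speaker_alt (cast : List (String × List (List (String × Int)))) (start : Int) (end_ : Int) : Option String :=
  match fmlsBestB start end_ cast none with
  | none => none
  | some (p, t) => if t = 0 then none else some p

-- ===== PRECONDITION & SPEC =====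
-- the prefix of a person's entry list that the loop inspects: everything up to and
-- including the first entry whose "end" exceeds end_ (the `break`)
def fmlsScanned (end_ : Int) : List (List (String × Int)) → List (List (String × Int))
  | [] => []
  | entry :: rest =>
      if (((entry.find? (fun kv => kv.1 == "end")).map (fun kv => kv.2)).getD 0) > end_
      then [entry] else entry :: fmlsScanned end_ rest

-- Pre_ excludes: the empty cast (A raises IndexError at l[0]); duplicate person keys
-- (not representable as a Python dict, the assoc-list input convention is ambiguous there);
-- and inspected entries missing the "end" key, or missing "start" when their end exceeds
-- start (A raises KeyError on those; entries past the break are unconstrained).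
def Pre_find_most_likely_speaker (cast : List (String × List (List (String × Int)))) (start : Int) (end_ : Int) : Prop :=
  cast ≠ [] ∧ (cast.map Prod.fst).Nodup ∧
    ∀ pe ∈ cast, ∀ entry ∈ fmlsScanned end_ pe.2,
      "end" ∈ entry.map Prod.fst ∧
      ((((entry.find? (fun kv => kv.1 == "end")).map (fun kv => kv.2)).getD 0 > start) →
        "start" ∈ entry.map Prod.fst)
instance (cast : List (String × List (List (String × Int)))) (start : Int) (end_ : Int) : Decidable (Pre_find_most_likely_speaker cast start end_) := by unfold Pre_find_most_likely_speaker; infer_instance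

def pvWitness_find_most_likely_speaker : (List (String × List (List (String × Int)))) × Int × Int :=
  ([("a", [[("start", 0), ("end", 2)]])], 0, 3)

def Spec_find_most_likely_speaker (cast : List (String × List (List (String × Int)))) (start : Int) (end_ : Int) (out : Option String) : Prop := out = find_most_likely_speaker_alt cast start end_
instance (cast : List (String × List (List (String × Int)))) (start : Int) (end_ : Int) (out : Option String) : Decidable (Spec_find_most_likely_speaker cast start end_ out) := by unfold Spec_find_most_likely_speaker; infer_instance

-- ===== CLAIM (what is proved, stated in full; the proofs are below) =====
def Claim_equal_find_most_likely_speaker : Prop := ∀ (cast : List (String × List (List (String × Int)))) (start : Int) (end_ : Int), Dom_find_most_likely_speaker cast start end_ → Pre_find_most_likely_speaker cast start end_ → Spec_find_most_likely_speaker cast start end_ (find_most_likely_speaker cast start end_)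

-- ===== LEMMAS AND PROOFS =====

-- the running first-wins strict max over (person, total) pairs
def fmlsRunBest (xs : List (String × Int)) (b : Option (String × Int)) : Option (String × Int) :=
  xs.foldl (fun b x =>
    match b with
    | none => some x
    | some bv => if bv.2 < x.2 then some x else some bv) b

lemma fmlsInnerA_insert (start end_ : Int) (person : String)
    (entries : List (List (String × Int))) (am : PySem.Dict String Int) (v : Int) :
    fmlsInnerA start end_ person entries (am.insert person v)
      = am.insert person (fmlsTotalB start end_ entries v) := by
  induction entries generalizing v with
  | nil => rfl
  | cons e rest ih =>
      simp only [fmlsInnerA, fmlsTotalB]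
      split_ifs with h1 h2 h2 <;>
        simp [PySem.Dict.modify, PySem.Dict.getD_insert_self, PySem.Dict.insert_insert_self, ih]

lemma fmlsOuterA_items (cast : List (String × List (List (String × Int)))) (start end_ : Int)
    (cast' : List (String × List (List (String × Int)))) (am : PySem.Dict String Int)
    (hnd : (cast'.map Prod.fst).Nodup)
    (hfresh : ∀ p ∈ cast'.map Prod.fst, am.contains p = false) :
    (fmlsOuterA cast start end_ cast' am).items
      = am.items ++ cast'.map (fun pe => (pe.1, fmlsTotalB start end_ (fmlsLookup cast pe.1) 0)) := by
  induction cast' generalizing am with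
  | nil => simp [fmlsOuterA]
  | cons pe rest ih =>
      obtain ⟨person, es⟩ := pe
      simp only [List.map_cons, List.nodup_cons] at hnd hfresh
      have hf0 : am.contains person = false := hfresh person (by simp)
      have hins : (am.insert person 0).items = am.items ++ [(person, 0)] := by
        simp [PySem.Dict.insert, hf0]
      simp only [fmlsOuterA, fmlsInnerA_insert]
      have hins2 : am.insert person (fmlsTotalB start end_ (fmlsLookup cast person) 0)
          = PySem.Dict.mk (am.items ++ [(person, fmlsTotalB start end_ (fmlsLookup cast person) 0)]) := by
        simp [PySem.Dict.insert, hf0]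
      rw [hins2, ih]
      · simp
      · exact hnd.2
      · intro p hp
        have hne : person ≠ p := fun h => hnd.1 (h ▸ hp)
        have h2 := hfresh p (List.mem_cons_of_mem _ hp)
        simp [PySem.Dict.contains, List.any_append] at h2 ⊢
        exact ⟨h2, hne⟩

lemma fmlsLookup_eq (cast : List (String × List (List (String × Int))))
    (hnd : (cast.map Prod.fst).Nodup) :
    ∀ pe ∈ cast, fmlsLookup cast pe.1 = pe.2 := by
  induction cast with
  | nil => intro pe h; cases h
  | cons q rest ih =>
      intro pe hpe
      simp only [List.map_cons, List.nodup_cons] at hnd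
      rcases List.mem_cons.mp hpe with h | h
      · subst h; simp [fmlsLookup, List.find?]
      · have h1 : pe.1 ∈ rest.map Prod.fst := List.mem_map.mpr ⟨pe, h, rfl⟩
        have hne : (q.1 == pe.1) = false := beq_eq_false_iff_ne.mpr (fun he => hnd.1 (he ▸ h1))
        have hstep : fmlsLookup (q :: rest) pe.1 = fmlsLookup rest pe.1 := by
          simp [fmlsLookup, List.find?, hne]
        rw [hstep]
        exact ih hnd.2 pe h

-- head of the stable reverse sort = running first-wins strict max
lemma fmlsInsertBy_head (x : String × Int) (acc : List (String × Int)) :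
    (PySem.List.insertBy (fun a b => decide (b.2 < a.2)) x acc).head?
      = (match acc.head? with
         | none => some x
         | some bv => if bv.2 < x.2 then some x else some bv) := by
  cases acc with
  | nil => rfl
  | cons h t =>
      simp only [PySem.List.insertBy, List.head?]
      split_ifs with hb <;> simp_all

lemma fmlsSorted_head (xs : List (String × Int)) :
    (PySem.List.sorted xs (fun p => p.2) true).head? = fmlsRunBest xs none := by
  rw [PySem.List.sorted_rev_eq_foldl_insertBy]
  suffices h : ∀ (acc : List (String × Int)),
      (xs.foldl (fun acc x => PySem.List.insertBy (fun a b => decide ((fun p => p.2) b < (fun p => p.2) a)) x acc) acc).head?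
        = fmlsRunBest xs acc.head? by
    simpa using h []
  induction xs with
  | nil => intro acc; rfl
  | cons x rest ih =>
      intro acc
      simp only [List.foldl_cons, fmlsRunBest, ih]
      congr 1
      exact fmlsInsertBy_head x acc

lemma fmlsBestB_eq (start end_ : Int) (cast : List (String × List (List (String × Int))))
    (b : Option (String × Int)) :
    fmlsBestB start end_ cast b
      = fmlsRunBest (cast.map (fun pe => (pe.1, fmlsTotalB start end_ pe.2 0))) b := by
  induction cast generalizing b with
  | nil => rfl
  | cons pe rest ih =>
      obtain ⟨person, es⟩ := pe
      simp only [fmlsBestB, List.map_cons, fmlsRunBest, List.foldl_cons, ih]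
      cases b with
      | none => rfl
      | some bv => rfl

-- ===== VERDICT (by name: the statement is the Claim_ definition above) =====
theorem find_most_likely_speaker_spec : Claim_equal_find_most_likely_speaker := by
  intro cast start end_ _hdom hpre
  obtain ⟨hne, hnd, _hkeys⟩ := hpre
  unfold Spec_find_most_likely_speaker find_most_likely_speaker find_most_likely_speaker_alt
  have hitems : (fmlsOuterA cast start end_ cast PySem.Dict.empty).items
      = cast.map (fun pe => (pe.1, fmlsTotalB start end_ pe.2 0)) := by
    rw [fmlsOuterA_items cast start end_ cast PySem.Dict.empty hnd (by intro p _; rfl)]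
    simp only [PySem.Dict.empty, List.nil_append]
    exact List.map_congr_left (fun pe hpe => by rw [fmlsLookup_eq cast hnd pe hpe])
  rw [hitems, fmlsBestB_eq]
  have hhead := fmlsSorted_head (cast.map (fun pe => (pe.1, fmlsTotalB start end_ pe.2 0)))
  cases hsort : PySem.List.sorted (cast.map (fun pe => (pe.1, fmlsTotalB start end_ pe.2 0))) (fun p => p.2) true with
  | nil =>
      exfalso
      have hp := PySem.List.sorted_perm (cast.map (fun pe => (pe.1, fmlsTotalB start end_ pe.2 0))) (fun p => p.2) true
      rw [hsort] at hp
      have hmap := hp.symm.eq_nil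
      simp only [List.map_eq_nil_iff] at hmap
      exact hne hmap
  | cons hd tl =>
      rw [hsort] at hhead
      simp only [List.head?] at hhead
      obtain ⟨p, c⟩ := hd
      rw [← hhead]
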